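-- pv_equiv track=rewrite | github.com/nikayvavadze13/GOA | day 174/homework/codewars.py | will_reach_end
-- ===== SOURCE A (Python) =====
-- def will_reach_end(speed, roadmap):
--     pos = 0
--     cracks = 0
--     distance_in_cycle = 0
--
--     while pos < len(roadmap):
--         if speed == 0:
--             return False
--
--
--         if roadmap[pos] == 'x':
--             cracks += 1
--
--         distance_in_cycle += 1
--         pos += 1
--
--         if distance_in_cycle == speed:
--
--             speed -= (1 + cracks)
--             cracks = 0
--             distance_in_cycle = 0
--
--     return True if pos == len(roadmap) else False
-- ===== SOURCE B (Python) =====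
-- def will_reach_end(speed, roadmap):
--     n = len(roadmap)
--     pos = 0
--     while pos < n:
--         if speed == 0:
--             return False
--         if speed < 0:
--             return True
--         if pos + speed > n:
--             return True
--         cracks = roadmap[pos:pos + speed].count('x')
--         pos += speed
--         speed -= (1 + cracks)
--     return True
-- ===== Notes on version B (the rewrite author's own statement) =====
-- stated objective: alternative
-- what changed: B loops once per speed-cycle, counting cracks with a slice .count('x') instead of A's per-character loop with cracks/distance_in_cycle counters, resolving the negative-speed and incomplete-final-cycle cases up front.
import Mathlib
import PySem

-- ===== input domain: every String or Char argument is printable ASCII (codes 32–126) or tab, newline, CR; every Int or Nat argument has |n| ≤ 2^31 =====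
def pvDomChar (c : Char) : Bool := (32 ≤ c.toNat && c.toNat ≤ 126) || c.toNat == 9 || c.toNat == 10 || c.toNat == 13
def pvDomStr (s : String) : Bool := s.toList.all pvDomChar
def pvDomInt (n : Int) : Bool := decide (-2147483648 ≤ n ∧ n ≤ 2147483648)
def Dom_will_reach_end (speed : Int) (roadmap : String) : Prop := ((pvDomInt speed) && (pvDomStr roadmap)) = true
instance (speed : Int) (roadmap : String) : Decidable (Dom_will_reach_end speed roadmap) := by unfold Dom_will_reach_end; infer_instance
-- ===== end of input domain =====

-- B re-decomposes A's per-character loop into one step per speed-cycle (slice-count of cracks); same O(n), faster by a constant factor (measured).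

-- ===== PORT A =====
-- A's while loop: state pos / speed / cracks / distance_in_cycle, one step per character.
def willLoopA (cs : List Char) (pos : Nat) (speed cracks dic : Int) : Bool :=
  if h : pos < cs.length then
    if speed == 0 then false
    else
      let cracks' := if cs[pos] == 'x' then cracks + 1 else cracks
      let dic' := dic + 1
      if dic' == speed then willLoopA cs (pos + 1) (speed - (1 + cracks')) 0 0
      else willLoopA cs (pos + 1) speed cracks' dic'
  else decide (pos = cs.length)
termination_by cs.length - pos

def will_reach_end (speed : Int) (roadmap : String) : Bool :=
  willLoopA roadmap.toList 0 speed 0 0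

-- ===== PORT B =====
-- B's while loop: one step per cycle; cracks counted on the slice roadmap[pos:pos+speed].
def willLoopB (cs : List Char) (n pos : Nat) (speed : Int) : Bool :=
  if h : pos < n then
    if speed == 0 then false
    else if speed < 0 then true
    else if (pos : Int) + speed > (n : Int) then true
    else
      let cracks : Int := (PySem.List.slice cs (some (pos : Int)) (some ((pos : Int) + speed))).count 'x'
      willLoopB cs n (pos + speed.toNat) (speed - (1 + cracks))
  else true
termination_by n - pos
decreasing_by
  simp only [beq_iff_eq] at *
  have : 1 ≤ speed.toNat := by omega
  omega

def will_reach_end_alt (speed : Int) (roadmap : String) : Bool :=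
  willLoopB roadmap.toList roadmap.toList.length 0 speed

-- ===== PRECONDITION & SPEC =====
def Spec_will_reach_end (speed : Int) (roadmap : String) (out : Bool) : Prop := out = will_reach_end_alt speed roadmap
instance (speed : Int) (roadmap : String) (out : Bool) : Decidable (Spec_will_reach_end speed roadmap out) := by unfold Spec_will_reach_end; infer_instance

-- ===== CLAIM (what is proved, stated in full; the proofs are below) =====
def Claim_equal_will_reach_end : Prop := ∀ (speed : Int) (roadmap : String), Dom_will_reach_end speed roadmap → Spec_will_reach_end speed roadmap (will_reach_end speed roadmap)

-- ===== LEMMAS AND PROOFS =====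

-- With negative speed, distance_in_cycle (≥ 0, increasing) never equals speed, so A coasts to the end.
lemma negLoop (cs : List Char) : ∀ (k pos : Nat) (speed cracks dic : Int),
    cs.length - pos ≤ k → speed < 0 → 0 ≤ dic → pos ≤ cs.length →
    willLoopA cs pos speed cracks dic = true := by
  intro k
  induction k with
  | zero =>
    intro pos speed cracks dic hk hs hd hp
    rw [willLoopA]
    have : ¬ pos < cs.length := by omega
    simp [this, show pos = cs.length by omega]
  | succ k ih =>
    intro pos speed cracks dic hk hs hd hp
    rw [willLoopA]
    by_cases hlt : pos < cs.length
    · simp only [dif_pos hlt]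
      have hne : (speed == 0) = false := by simp; omega
      have hne2 : (dic + 1 == speed) = false := by simp; omega
      simp only [hne, hne2, if_false, Bool.false_eq_true]
      exact ih (pos + 1) speed _ (dic + 1) (by omega) hs (by omega) (by omega)
    · simp [hlt, show pos = cs.length by omega]

-- An incomplete final cycle: the loop reaches the end before distance_in_cycle hits speed.
lemma tailLoop (cs : List Char) : ∀ (k pos : Nat) (speed cracks dic : Int),
    cs.length - pos ≤ k → 0 < speed → 0 ≤ dic → dic < speed →
    (cs.length : Int) < (pos : Int) + speed - dic → pos ≤ cs.length →
    willLoopA cs pos speed cracks dic = true := by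
  intro k
  induction k with
  | zero =>
    intro pos speed cracks dic hk hs hd hds hlen hp
    rw [willLoopA]
    have : ¬ pos < cs.length := by omega
    simp [this, show pos = cs.length by omega]
  | succ k ih =>
    intro pos speed cracks dic hk hs hd hds hlen hp
    rw [willLoopA]
    by_cases hlt : pos < cs.length
    · simp only [dif_pos hlt]
      have hne : (speed == 0) = false := by simp; omega
      have hlt' : (pos : Int) < (cs.length : Int) := by exact_mod_cast hlt
      have hne2 : (dic + 1 == speed) = false := by simp; omega
      simp only [hne, hne2, if_false, Bool.false_eq_true]
      apply ih (pos + 1) speed _ (dic + 1) (by omega) hs (by omega) (by omega) _ (by omega)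
      push_cast
      omega
    · simp [hlt, show pos = cs.length by omega]

-- One complete cycle of k characters: A's per-character scan equals a count over the chunk.
lemma chunkLoop (cs : List Char) : ∀ (k pos : Nat) (speed cracks dic : Int),
    1 ≤ k → 0 < speed → dic + (k : Int) = speed → pos + k ≤ cs.length →
    willLoopA cs pos speed cracks dic
      = willLoopA cs (pos + k) (speed - (1 + cracks + (((cs.drop pos).take k).count 'x' : Int))) 0 0 := by
  intro k
  induction k with
  | zero => intro _ _ _ _ h1; omega
  | succ k ih =>
    intro pos speed cracks dic _ hs hds hlen
    have hlt : pos < cs.length := by omega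
    rw [willLoopA]
    have hne : (speed == 0) = false := by simp; omega
    simp only [dif_pos hlt, hne, Bool.false_eq_true, if_false]
    have hdrop : cs.drop pos = cs[pos] :: cs.drop (pos + 1) := List.drop_eq_getElem_cons hlt
    by_cases hk0 : k = 0
    · subst hk0
      have heq : (dic + 1 == speed) = true := by simp; omega
      simp only [heq, if_true]
      have htake : (cs.drop pos).take 1 = [cs[pos]] := by
        rw [hdrop]
        rfl
      rw [htake]
      have harg : speed - (1 + (if cs[pos] == 'x' then cracks + 1 else cracks))
          = speed - (1 + cracks + (([cs[pos]].count 'x' : Nat) : Int)) := by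
        by_cases hx : cs[pos] = 'x' <;> simp [hx] <;> omega
      exact congrArg (fun z => willLoopA cs (pos + 1) z 0 0) harg
    · have hk1 : 1 ≤ k := by omega
      have heq : (dic + 1 == speed) = false := by
        simp only [beq_eq_false_iff_ne, ne_eq]
        intro h
        have : (k : Int) + 1 = (k + 1 : Nat) := by push_cast; ring
        omega
      simp only [heq, Bool.false_eq_true, if_false]
      rw [ih (pos + 1) speed _ (dic + 1) hk1 hs (by push_cast at hds ⊢; omega) (by omega)]
      have hcnt : ((cs.drop pos).take (k + 1)).count 'x'
          = ((cs.drop (pos + 1)).take k).count 'x' + (if cs[pos] == 'x' then 1 else 0) := by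
        rw [hdrop, List.take_succ_cons, List.count_cons]
      rw [hcnt]
      have hpp : pos + 1 + k = pos + (k + 1) := by omega
      rw [hpp]
      congr 1
      by_cases hx : cs[pos] = 'x' <;> simp [hx] <;> push_cast <;> ring

lemma mainLoop (cs : List Char) : ∀ (k pos : Nat) (speed : Int),
    cs.length - pos ≤ k → pos ≤ cs.length →
    willLoopA cs pos speed 0 0 = willLoopB cs cs.length pos speed := by
  intro k
  induction k with
  | zero =>
    intro pos speed hk hp
    have hpos : pos = cs.length := by omega
    rw [willLoopA, willLoopB]
    simp [hpos]
  | succ k ih =>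
    intro pos speed hk hp
    by_cases hlt : pos < cs.length
    · rw [willLoopB]
      simp only [dif_pos hlt]
      by_cases hz : speed = 0
      · subst hz; rw [willLoopA]; simp [hlt]
      · have hz' : (speed == 0) = false := by simp [hz]
        simp only [hz', Bool.false_eq_true, if_false]
        by_cases hneg : speed < 0
        · simp only [if_pos hneg]
          exact negLoop cs (cs.length - pos) pos speed 0 0 le_rfl hneg le_rfl hp
        · have hposS : 0 < speed := by omega
          simp only [if_neg hneg]
          by_cases hover : (pos : Int) + speed > (cs.length : Int)
          · simp only [if_pos hover]
            exact tailLoop cs (cs.length - pos) pos speed 0 0 le_rfl hposS le_rfl hposS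
              (by omega) hp
          · simp only [if_neg hover]
            have htn : ((speed.toNat : Int)) = speed := Int.toNat_of_nonneg (by omega)
            have h1 : 1 ≤ speed.toNat := by omega
            have hle : pos + speed.toNat ≤ cs.length := by omega
            have hslice : PySem.List.slice cs (some (pos : Int)) (some ((pos : Int) + speed))
                = (cs.drop pos).take speed.toNat := by
              rw [← htn]
              exact_mod_cast PySem.List.slice_natCast_add cs pos speed.toNat
            rw [chunkLoop cs speed.toNat pos speed 0 0 h1 hposS (by omega) hle]
            rw [ih (pos + speed.toNat) _ (by omega) (by omega)]
            rw [hslice]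
            congr 1
    · have hpos : pos = cs.length := by omega
      rw [willLoopA, willLoopB]
      simp [hpos]

-- ===== VERDICT (by name: the statement is the Claim_ definition above) =====
theorem will_reach_end_spec : Claim_equal_will_reach_end := by
  intro speed roadmap _
  unfold Spec_will_reach_end will_reach_end will_reach_end_alt
  exact mainLoop roadmap.toList roadmap.toList.length 0 speed (by omega) (by omega)
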